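-- pv_equiv track=rewrite | github.com/Philippovitsch/katas | python/main/counting_duplicates.py | get_unique_letters
-- ===== SOURCE A (Python) =====
-- def get_unique_letters(text):
--     letters = [letter for letter in text]
--     unique_letters = {}
--     for letter in letters:
--         if letter.lower() in unique_letters:
--             unique_letters[letter.lower()] += 1
--         else:
--             unique_letters[letter.lower()] = 1
--     return unique_letters
-- ===== SOURCE B (Python) =====
-- def get_unique_letters(text):
--     lowered = [letter.lower() for letter in text]
--
--     def go(rest):
--         if not rest:
--             return []
--         head = rest[0]
--         remaining = [x for x in rest if x != head]
--         return [(head, len(rest) - len(remaining))] + go(remaining)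
--
--     result = {}
--     for key, n in go(lowered):
--         result[key] = n
--     return result
-- ===== Notes on version B (the rewrite author's own statement) =====
-- stated objective: alternative
-- what changed: Replaces the single-pass dict-update loop by a recursive partition scheme: take the first remaining letter, compute its multiplicity as the length drop after filtering it out, and recurse on the filtered rest, assembling (key,count) pairs in first-appearance order.
import Mathlib
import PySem

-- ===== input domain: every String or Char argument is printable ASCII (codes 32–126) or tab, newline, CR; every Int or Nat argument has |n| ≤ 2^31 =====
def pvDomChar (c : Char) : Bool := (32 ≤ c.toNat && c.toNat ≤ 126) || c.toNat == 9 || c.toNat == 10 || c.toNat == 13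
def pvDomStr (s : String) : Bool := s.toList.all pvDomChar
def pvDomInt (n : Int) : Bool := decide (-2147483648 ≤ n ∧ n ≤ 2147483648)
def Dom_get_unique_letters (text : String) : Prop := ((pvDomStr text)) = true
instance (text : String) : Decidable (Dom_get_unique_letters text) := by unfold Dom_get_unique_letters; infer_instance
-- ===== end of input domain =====

-- B replaces A's one-pass dict-update loop by recursive head-partitioning (count the head as the
-- length drop after filtering it out, recurse on the filtered rest); alternative decomposition, not faster.

-- ===== PORT A =====
def get_unique_letters (text : String) : List (String × Int) :=
  let letters : List String := text.toList.map (fun c => String.mk [c])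
  (letters.foldl (fun d letter =>
      match d.get? (PySem.Str.lower letter) with
      | some v => d.insert (PySem.Str.lower letter) (v + 1)
      | none   => d.insert (PySem.Str.lower letter) 1)
    PySem.Dict.empty).items

-- ===== PORT B =====
-- Source B's inner `go`: take the head, its multiplicity is the length drop of the filtered rest, recurse.
def pvGoB (rest : List String) : List (String × Int) :=
  match rest with
  | [] => []
  | head :: t =>
    let remaining := (head :: t).filter (fun x => x ≠ head)
    (head, ((head :: t).length : Int) - (remaining.length : Int)) :: pvGoB remaining
termination_by rest.length
decreasing_by
  have h1 : ((head :: t).filter (fun x => x ≠ head)).length ≤ t.length := by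
    simp only [List.filter_cons]
    simp
    exact List.length_filter_le _ t
  simpa using Nat.lt_succ_of_le h1

def get_unique_letters_alt (text : String) : List (String × Int) :=
  let lowered : List String := text.toList.map (fun c => PySem.Str.lower (String.mk [c]))
  ((pvGoB lowered).foldl (fun d p => d.insert p.1 p.2) PySem.Dict.empty).items

-- ===== PRECONDITION & SPEC =====
def Spec_get_unique_letters (text : String) (out : List (String × Int)) : Prop := out = get_unique_letters_alt text
instance (text : String) (out : List (String × Int)) : Decidable (Spec_get_unique_letters text out) := by unfold Spec_get_unique_letters; infer_instance

-- ===== CLAIM (what is proved, stated in full; the proofs are below) =====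
def Claim_equal_get_unique_letters : Prop := ∀ (text : String), Dom_get_unique_letters text → Spec_get_unique_letters text (get_unique_letters text)

-- ===== LEMMAS AND PROOFS =====

-- Adding an element already present is a no-op.
theorem set_add_mem {s : PySem.Set String} {x : String} (h : x ∈ s) : PySem.Set.add s x = s := by
  simp [PySem.Set.add, PySem.Set.contains, h]

-- Folding Set.add over a list ignores occurrences of an element already in the accumulator.
theorem foldl_add_filter (l : List String) (s : PySem.Set String) (h : String) (hs : h ∈ s) :
    l.foldl PySem.Set.add s = (l.filter (fun x => x ≠ h)).foldl PySem.Set.add s := by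
  induction l generalizing s with
  | nil => rfl
  | cons x t ih =>
    by_cases hx : x = h
    · subst hx
      simp only [List.filter_cons]
      simp only [List.foldl_cons, set_add_mem hs]
      rw [if_neg (by simp)]
      exact ih s hs
    · rw [List.filter_cons, if_pos (by simp [hx])]
      simp only [List.foldl_cons]
      exact ih _ (by simp [PySem.Set.mem_add, hs])

-- A head element absent from the rest of the fold stays in front of the accumulator.
theorem foldl_add_head (u : List String) (h : String) (acc : PySem.Set String)
    (hu : h ∉ u) :
    u.foldl PySem.Set.add (h :: acc) = h :: u.foldl PySem.Set.add acc := by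
  induction u generalizing acc with
  | nil => rfl
  | cons x t ih =>
    have hx : x ≠ h := fun e => hu (by simp [e])
    have step : PySem.Set.add (h :: acc) x = h :: PySem.Set.add acc x := by
      by_cases hm : x ∈ acc
      · rw [set_add_mem (by simp [hm]), set_add_mem hm]
      · simp [PySem.Set.add, PySem.Set.contains, hm, hx]
    simp only [List.foldl_cons, step]
    exact ih _ (fun e => hu (by simp [e]))

-- set(h :: t) is h followed by the set of t with all h's removed.
theorem ofList_cons_filter (h : String) (t : List String) :
    PySem.Set.ofList (h :: t) = h :: PySem.Set.ofList (t.filter (fun x => x ≠ h)) := by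
  rw [PySem.Set.ofList_eq_foldl, PySem.Set.ofList_eq_foldl]
  simp only [List.foldl_cons]
  have h1 : PySem.Set.add ([] : PySem.Set String) h = [h] := by
    simp [PySem.Set.add, PySem.Set.contains]
  rw [h1, foldl_add_filter t [h] h (by simp)]
  exact foldl_add_head _ h [] (by simp)

-- An element's multiplicity plus the filtered length is the whole length.
theorem count_add_filter_len (h : String) (l : List String) :
    l.count h + (l.filter (fun x => x ≠ h)).length = l.length := by
  induction l with
  | nil => simp
  | cons x t ih =>
    simp only [decide_not] at ih
    by_cases hx : x = h
    · subst hx; simp; omega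
    · simp [hx]; omega

-- The head's multiplicity equals the length drop caused by filtering it out.
theorem count_eq_length_sub (h : String) (l : List String) :
    (l.count h : Int) = (l.length : Int) - ((l.filter (fun x => x ≠ h)).length : Int) := by
  have := count_add_filter_len h l
  omega

-- Counting a non-filtered element is unchanged by the filter.
theorem count_filter_ne (k h : String) (hk : k ≠ h) (l : List String) :
    (l.filter (fun x => x ≠ h)).count k = l.count k := by
  rw [List.count_filter (by simp [hk])]

-- Source B's `go` produces exactly the (first-occurrence key, total count) pairs.
theorem pvGoB_eq (ls : List String) :
    pvGoB ls = (PySem.Set.ofList ls).map (fun k => (k, (ls.count k : Int))) := by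
  induction hn : ls.length using Nat.strong_induction_on generalizing ls with
  | _ n ih =>
    match ls with
    | [] => rw [pvGoB.eq_def]; simp
    | h :: t =>
      rw [pvGoB.eq_def]
      simp only []
      have hrem : (h :: t).filter (fun x => x ≠ h) = t.filter (fun x => x ≠ h) := by
        rw [List.filter_cons, if_neg (by simp)]
      have hlen : (t.filter (fun x => x ≠ h)).length < n := by
        simp only [← hn, List.length_cons]
        calc (t.filter (fun x => x ≠ h)).length ≤ t.length := List.length_filter_le _ t
          _ < t.length + 1 := Nat.lt_succ_self _
      rw [hrem, ih _ hlen _ rfl, ofList_cons_filter]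
      simp only [List.map_cons]
      congr 1
      · congr 1
        rw [count_eq_length_sub h (h :: t), hrem]
      · apply List.map_congr_left
        intro k hk
        have hkf : k ∈ t.filter (fun x => x ≠ h) := by
          rw [← PySem.Set.mem_ofList]; exact hk
        have hkne : k ≠ h := by
          have := List.of_mem_filter hkf
          simpa using this
        rw [count_filter_ne k h hkne]
        simp [Ne.symm hkne]

-- A's branch on `get?` is exactly the insert-getD-plus-one step.
theorem step_eq (d : PySem.Dict String Int) (k : String) :
    (match d.get? k with
      | some v => d.insert k (v + 1)
      | none   => d.insert k 1) = d.insert k (d.getD k 0 + 1) := by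
  cases h : d.get? k with
  | some v => simp [PySem.Dict.getD_eq_get?_getD, h]
  | none => simp [PySem.Dict.getD_eq_get?_getD, h]

-- A's whole loop, on any list of letter strings, yields the set-of-keys/count items.
theorem loopA_items (ls : List String) :
    (ls.foldl (fun d letter =>
        match d.get? (PySem.Str.lower letter) with
        | some v => d.insert (PySem.Str.lower letter) (v + 1)
        | none   => d.insert (PySem.Str.lower letter) 1)
      (PySem.Dict.empty : PySem.Dict String Int)).items
    = (PySem.Set.ofList (ls.map PySem.Str.lower)).map
        (fun k => (k, ((ls.map PySem.Str.lower).count k : Int))) := by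
  rw [show (fun (d : PySem.Dict String Int) (letter : String) =>
        match d.get? (PySem.Str.lower letter) with
        | some v => d.insert (PySem.Str.lower letter) (v + 1)
        | none   => d.insert (PySem.Str.lower letter) 1)
      = (fun d letter => d.insert (PySem.Str.lower letter) (d.getD (PySem.Str.lower letter) 0 + 1))
      from funext fun d => funext fun letter => step_eq d (PySem.Str.lower letter)]
  rw [← List.foldl_map (f := fun letter => PySem.Str.lower letter)
        (g := fun (d : PySem.Dict String Int) x => d.insert x (d.getD x 0 + 1))]
  rw [PySem.Dict.foldl_insert_getD_add_one_eq_counter, PySem.Dict.items_counter]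

-- B's final dict-building loop over go's fresh distinct keys just reproduces go's pairs.
theorem loopB_items (ls : List String) :
    ((pvGoB ls).foldl (fun d p => d.insert p.1 p.2) (PySem.Dict.empty : PySem.Dict String Int)).items
    = pvGoB ls := by
  rw [PySem.Dict.items_foldl_insert_fresh]
  · show PySem.Dict.empty.items ++ _ = _
    rw [show (PySem.Dict.empty : PySem.Dict String Int).items = [] from rfl]
    simp
  · intro a _; simp [PySem.Dict.contains_empty]
  · rw [pvGoB_eq]
    simp only [List.map_map]
    have : ((fun (p : String × Int) => p.1) ∘ fun k => (k, (ls.count k : Int))) = id := rfl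
    rw [this, List.map_id]
    exact PySem.Set.nodup_ofList _

-- ===== VERDICT (by name: the statement is the Claim_ definition above) =====
theorem get_unique_letters_spec : Claim_equal_get_unique_letters := by
  intro text _
  show get_unique_letters text = get_unique_letters_alt text
  unfold get_unique_letters get_unique_letters_alt
  rw [loopA_items, loopB_items, pvGoB_eq]
  simp [Function.comp_def]
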